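-- pv_equiv track=rewrite | github.com/pypi-data/pypi-mirror-352 | packages/projectprompt/projectprompt-1.3.1-py3-none-any.whl/src/utils/rules_parser.py | _extract_project_description
-- ===== SOURCE A (Python) =====
-- from typing import Dict, List, Optional, Tuple, Any
--
-- def _extract_project_description(content: str) -> Optional[str]:
--     """Extract project description from content"""
--     # Look for overview or description section
--     lines = content.split('\n')
--     in_overview = False
--     description_lines = []
--
--     for line in lines:
--         if line.lower().startswith('## project overview'):
--             in_overview = True
--             continue
--         elif line.startswith('##') and in_overview:
--             break
--         elif in_overview and line.strip():
--             description_lines.append(line.strip())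
--
--     return ' '.join(description_lines) if description_lines else None
-- ===== SOURCE B (Python) =====
-- from typing import List, Optional
--
--
-- def _overview_section(lines: List[str]) -> Optional[List[str]]:
--     """Lines of the '## Project Overview' section: everything after its header
--     up to (not including) the next '##' heading."""
--     for i, line in enumerate(lines):
--         if line.lower().startswith('## project overview'):
--             tail = lines[i + 1:]
--             end = next((j for j, l in enumerate(tail) if l.startswith('##')), len(tail))
--             return tail[:end]
--     return None
--
--
-- def _extract_project_description(content: str) -> Optional[str]:
--     section = _overview_section(content.split('\n'))
--     if section is None:
--         return None
--     parts = [l.strip() for l in section if l.strip()]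
--     return ' '.join(parts) if parts else None
-- ===== Notes on version B (the rewrite author's own statement) =====
-- stated objective: simpler
-- what changed: Replaced A's single flag-threaded loop by a staged decomposition (locate the overview header, slice the section up to the next '##' heading, then strip/filter/join that slice); Pre_ excludes contents where a repeated '## project overview' header is not separated from an earlier one by another '##' heading, a corner where A's skip-and-merge of the duplicate and B's stop-at-next-heading are both defensible readings.
-- outside the precondition, e.g. on _extract_project_description('## Project Overview\na\n## Project Overview\nb'): A returns 'a b', B returns 'a'
import Mathlib
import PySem

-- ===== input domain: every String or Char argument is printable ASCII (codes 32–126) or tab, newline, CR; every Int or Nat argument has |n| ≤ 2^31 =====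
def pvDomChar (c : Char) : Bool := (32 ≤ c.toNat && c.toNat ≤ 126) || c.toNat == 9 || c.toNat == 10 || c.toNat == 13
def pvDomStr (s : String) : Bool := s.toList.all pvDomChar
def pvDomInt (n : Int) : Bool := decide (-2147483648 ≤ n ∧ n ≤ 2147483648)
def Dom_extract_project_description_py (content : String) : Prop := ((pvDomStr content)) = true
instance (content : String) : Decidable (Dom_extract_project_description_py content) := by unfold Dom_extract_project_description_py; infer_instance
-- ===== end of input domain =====

-- B: staged decomposition (find the header, slice the section to the next heading, strip/filter/join)
-- instead of A's single flag-threaded loop; equal cost, simpler structure.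


-- ===== PORT A =====
-- A's for-loop over the lines with the in_overview flag and the break (break = return acc).
def pvLoopA : List String → Bool → List String → List String
  | [], _, acc => acc
  | l :: ls, inov, acc =>
    if PySem.Str.startswith (PySem.Str.lower l) "## project overview" then
      pvLoopA ls true acc
    else if PySem.Str.startswith l "##" && inov then
      acc
    else if inov && (PySem.Str.strip l != "") then
      pvLoopA ls inov (acc ++ [PySem.Str.strip l])
    else
      pvLoopA ls inov acc

def extract_project_description_py (content : String) : Option String :=
  let lines := (PySem.Str.split? content "\n").getD []
  let description_lines := pvLoopA lines false []
  if description_lines ≠ [] then some (PySem.Str.join " " description_lines) else none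

-- ===== PORT B =====
-- _overview_section: first line whose lowercase starts with the header; the tail up to the next '##' heading.
def pvOverviewSection (lines : List String) : Option (List String) :=
  match lines.findIdx? (fun l => PySem.Str.startswith (PySem.Str.lower l) "## project overview") with
  | none => none
  | some i => some ((lines.drop (i + 1)).takeWhile (fun l => !PySem.Str.startswith l "##"))

def extract_project_description_py_alt (content : String) : Option String :=
  match pvOverviewSection ((PySem.Str.split? content "\n").getD []) with
  | none => none
  | some sec =>
    let parts := (sec.map PySem.Str.strip).filter (fun s => s != "")
    if parts.isEmpty then none else some (PySem.Str.join " " parts)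

-- ===== PRECONDITION & SPEC =====
-- Pre_ excludes contents in which a repeated '## project overview' header (case-insensitive) is not
-- separated from an earlier one by some other '##' heading: on such inputs A skips the repeated
-- header and merges the sections while B stops at it — both defensible readings of an unspecified
-- duplicate-header corner.
def Pre_extract_project_description_py (content : String) : Prop :=
  let lines := (PySem.Str.split? content "\n").getD []
  ∀ j ∈ List.range lines.length, ∀ i ∈ List.range j,
    PySem.Str.startswith (PySem.Str.lower (lines.getD i "")) "## project overview" = true →
    PySem.Str.startswith (PySem.Str.lower (lines.getD j "")) "## project overview" = true →
    ∃ k ∈ List.range j, i < k ∧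
      PySem.Str.startswith (lines.getD k "") "##" = true ∧
      PySem.Str.startswith (PySem.Str.lower (lines.getD k "")) "## project overview" = false
instance (content : String) : Decidable (Pre_extract_project_description_py content) := by
  unfold Pre_extract_project_description_py; infer_instance

def pvWitness_extract_project_description_py : String :=
  "## Project Overview\nA tool.\n\n## Usage"

def Spec_extract_project_description_py (content : String) (out : Option String) : Prop := out = extract_project_description_py_alt content
instance (content : String) (out : Option String) : Decidable (Spec_extract_project_description_py content out) := by unfold Spec_extract_project_description_py; infer_instance

-- ===== CLAIM (what is proved, stated in full; the proofs are below) =====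
def Claim_equal_extract_project_description_py : Prop := ∀ (content : String), Dom_extract_project_description_py content → Pre_extract_project_description_py content → Spec_extract_project_description_py content (extract_project_description_py content)

-- ===== LEMMAS AND PROOFS =====

-- every overview line of ls is preceded by a non-overview '##' line
def pvGuarded (ls : List String) : Prop :=
  ∀ j, PySem.Str.startswith (PySem.Str.lower (ls.getD j "")) "## project overview" = true →
    ∃ k, k < j ∧ PySem.Str.startswith (ls.getD k "") "##" = true ∧
      PySem.Str.startswith (PySem.Str.lower (ls.getD k "")) "## project overview" = false

-- A's loop before the flag is set searches for the first overview header
theorem pvLoopA_false (ls : List String) : ∀ acc, pvLoopA ls false acc =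
    match ls.findIdx? (fun l => PySem.Str.startswith (PySem.Str.lower l) "## project overview") with
    | none => acc
    | some i => pvLoopA (ls.drop (i + 1)) true acc := by
  induction ls with
  | nil => intro acc; rfl
  | cons l ls ih =>
    intro acc
    simp only [pvLoopA, List.findIdx?_cons]
    by_cases h : PySem.Str.startswith (PySem.Str.lower l) "## project overview"
    · simp only [h, if_true]
      rfl
    · rw [Bool.not_eq_true] at h
      simp only [h, Bool.false_eq_true, if_false, Bool.and_false, Bool.false_and]
      rw [ih acc]
      cases hf : ls.findIdx? (fun l => PySem.Str.startswith (PySem.Str.lower l) "## project overview") <;>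
        simp [List.drop_succ_cons]

-- once the flag is set, on a guarded tail A's loop collects exactly the stripped
-- nonempty lines of the section up to the next '##' heading
set_option maxHeartbeats 1000000 in
theorem pvLoopA_true_guarded (ls : List String) (hg : pvGuarded ls) :
    ∀ acc, pvLoopA ls true acc =
      acc ++ ((ls.takeWhile (fun l => !PySem.Str.startswith l "##")).map PySem.Str.strip).filter
        (fun s => s != "") := by
  induction ls with
  | nil => intro acc; simp [pvLoopA]
  | cons l ls ih =>
    intro acc
    have hl : PySem.Str.startswith (PySem.Str.lower l) "## project overview" = false := by
      cases hpl : PySem.Str.startswith (PySem.Str.lower l) "## project overview" with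
      | false => rfl
      | true =>
        obtain ⟨k, hk, -, -⟩ := hg 0 (by simpa using hpl)
        omega
    simp only [pvLoopA, hl, Bool.false_eq_true, if_false, Bool.and_true, Bool.true_and,
      List.takeWhile_cons]
    by_cases hh : PySem.Str.startswith l "##"
    · simp only [hh, if_true, Bool.not_true, Bool.false_eq_true, if_false, List.map_nil,
        List.filter_nil, List.append_nil]
    · rw [Bool.not_eq_true] at hh
      have hg' : pvGuarded ls := by
        intro j hj
        obtain ⟨k, hk, hhk, hok⟩ := hg (j + 1) (by simpa using hj)
        match k with
        | 0 =>
          rw [List.getD_cons_zero] at hhk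
          rw [hh] at hhk
          cases hhk
        | k + 1 =>
          exact ⟨k, by omega, by simpa using hhk, by simpa using hok⟩
      simp only [hh, Bool.false_eq_true, if_false, Bool.not_false, if_true, List.map_cons,
        List.filter_cons]
      by_cases hs : (PySem.Str.strip l != "") = true
      · simp only [hs, if_true, ih hg', List.append_assoc, List.singleton_append]
      · rw [Bool.not_eq_true] at hs
        simp only [hs, Bool.false_eq_true, if_false, ih hg']

-- under Pre_, the lines after the first overview header are guarded
set_option maxHeartbeats 1000000 in
theorem pvGuarded_drop (L : List String)
    (hpre : ∀ j ∈ List.range L.length, ∀ i ∈ List.range j,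
      PySem.Str.startswith (PySem.Str.lower (L.getD i "")) "## project overview" = true →
      PySem.Str.startswith (PySem.Str.lower (L.getD j "")) "## project overview" = true →
      ∃ k ∈ List.range j, i < k ∧
        PySem.Str.startswith (L.getD k "") "##" = true ∧
        PySem.Str.startswith (PySem.Str.lower (L.getD k "")) "## project overview" = false)
    (i : Nat)
    (hf : L.findIdx? (fun l => PySem.Str.startswith (PySem.Str.lower l) "## project overview") = some i) :
    pvGuarded (L.drop (i + 1)) := by
  have hgd : ∀ m, (L.drop (i + 1)).getD m "" = L.getD (i + 1 + m) "" := by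
    intro m
    rw [List.getD_eq_getElem?_getD, List.getElem?_drop, ← List.getD_eq_getElem?_getD]
  obtain ⟨hilen, hpi, -⟩ := List.findIdx?_eq_some_iff_getElem.mp hf
  intro j hj
  rw [hgd j] at hj
  have hjlen : i + 1 + j < L.length := by
    by_contra hbig
    rw [List.getD_eq_default _ _ (by omega)] at hj
    simp [PySem.Str.lower, PySem.Str.startswith, PySem.Chars.lower, PySem.Chars.startswith] at hj
  have hoi : PySem.Str.startswith (PySem.Str.lower (L.getD i "")) "## project overview" = true := by
    rw [List.getD_eq_getElem _ _ hilen]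
    simpa using hpi
  obtain ⟨k, hkr, hik, hhk, hok⟩ :=
    hpre (i + 1 + j) (List.mem_range.mpr hjlen) i (List.mem_range.mpr (by omega)) hoi hj
  rw [List.mem_range] at hkr
  refine ⟨k - (i + 1), by omega, ?_, ?_⟩
  · rw [hgd (k - (i + 1)), show i + 1 + (k - (i + 1)) = k from by omega]
    exact hhk
  · rw [hgd (k - (i + 1)), show i + 1 + (k - (i + 1)) = k from by omega]
    exact hok

-- ===== VERDICT (by name: the statement is the Claim_ definition above) =====
set_option maxHeartbeats 1000000 in
theorem extract_project_description_py_spec : Claim_equal_extract_project_description_py := by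
  intro content _ hpre
  unfold Spec_extract_project_description_py extract_project_description_py
    extract_project_description_py_alt pvOverviewSection
  unfold Pre_extract_project_description_py at hpre
  simp only [pvLoopA_false]
  cases hf : ((PySem.Str.split? content "\n").getD []).findIdx?
      (fun l => PySem.Str.startswith (PySem.Str.lower l) "## project overview") with
  | none => simp
  | some i =>
    simp only [hf]
    rw [pvLoopA_true_guarded _ (pvGuarded_drop _ hpre i hf)]
    simp only [List.nil_append]
    cases hp : (((((PySem.Str.split? content "\n").getD []).drop (i + 1)).takeWhile
        (fun l => !PySem.Str.startswith l "##")).map PySem.Str.strip).filter (fun s => s != "") <;>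
      simp
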